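-- pv_equiv track=rewrite | github.com/beilawen54-cloud/flipping_tool | webs_toolkit.py | pair_perfect_zip
-- ===== SOURCE A (Python) =====
-- from typing import List, Tuple, Optional, Dict
--
-- Edge = Tuple[int, int, int]  # (start_idx, end_idx, level) with level = high digit (2..n)
--
-- def pair_perfect_zip(byw: str, n: int) -> List[Edge]:
--     edges: List[Edge] = []
--     for k in range(2, n+1):
--         low = [i for i, ch in enumerate(byw) if ch == str(k-1)]
--         high = [i for i, ch in enumerate(byw) if ch == str(k)]
--         m = min(len(low), len(high))
--         for a, b in zip(low[:m], high[:m]):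
--             edges.append((a, b, k))
--     return edges
-- ===== SOURCE B (Python) =====
-- from typing import List, Tuple
--
-- Edge = Tuple[int, int, int]
--
-- def pair_perfect_zip(byw: str, n: int) -> List[Edge]:
--     # one pass: group positions by character, then pair per level
--     pos = {}
--     for i, ch in enumerate(byw):
--         pos.setdefault(ch, []).append(i)
--     edges: List[Edge] = []
--     for k in range(2, min(n, 9) + 1):
--         for a, b in zip(pos.get(str(k - 1), []), pos.get(str(k), [])):
--             edges.append((a, b, k))
--     return edges
-- ===== Notes on version B (the rewrite author's own statement) =====
-- stated objective: faster
-- what changed: Instead of rescanning the whole string twice for every level k in 2..n, B groups all character positions in one pass into a dict and pairs per level, capping the level loop at 9 because no single character can equal str(k) for k >= 10.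
import Mathlib
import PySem

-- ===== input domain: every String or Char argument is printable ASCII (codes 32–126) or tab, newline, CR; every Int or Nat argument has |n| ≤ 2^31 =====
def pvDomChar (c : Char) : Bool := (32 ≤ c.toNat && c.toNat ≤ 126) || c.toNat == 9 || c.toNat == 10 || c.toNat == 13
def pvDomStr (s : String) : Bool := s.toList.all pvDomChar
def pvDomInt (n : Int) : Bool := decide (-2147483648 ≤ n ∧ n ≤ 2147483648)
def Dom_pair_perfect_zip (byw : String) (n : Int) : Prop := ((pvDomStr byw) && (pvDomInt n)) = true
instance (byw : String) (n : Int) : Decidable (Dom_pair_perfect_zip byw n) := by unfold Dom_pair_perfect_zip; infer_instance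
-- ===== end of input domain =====

-- B replaces A's per-level rescans of the string by a single grouping pass (char → positions) and caps the
-- level loop at 9, since no single character can equal str(k) for k ≥ 10; same return value for every input.

-- ===== PORT A =====
-- for k in range(2, n+1): low/high = positions of str(k-1)/str(k); zip the min-length prefixes
def pair_perfect_zip (byw : String) (n : Int) : List (Int × Int × Int) :=
  (PySem.List.pyRange 2 (n + 1) 1).foldl (fun edges k =>
    let low := ((PySem.List.enumerate byw.toList 0).filter
        (fun p => [p.2] == PySem.Int.toChars (k - 1))).map (fun p => p.1)
    let high := ((PySem.List.enumerate byw.toList 0).filter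
        (fun p => [p.2] == PySem.Int.toChars k)).map (fun p => p.1)
    let m : Int := min (low.length : Int) (high.length : Int)
    edges ++ ((PySem.List.slice low none (some m)).zip
              (PySem.List.slice high none (some m))).map (fun p => (p.1, p.2, k))) []

-- ===== PORT B =====
-- one grouping pass: pos.setdefault(ch, []).append(i), i.e. pos[ch] = pos.get(ch, []) + [i]; then pair per level 2..min(n,9)
def pair_perfect_zip_alt (byw : String) (n : Int) : List (Int × Int × Int) :=
  let pos : PySem.Dict (List Char) (List Int) :=
    (PySem.List.enumerate byw.toList 0).foldl
      (fun d p => d.modify [p.2] [] (fun t => t ++ [p.1])) PySem.Dict.empty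
  (PySem.List.pyRange 2 (min n 9 + 1) 1).foldl (fun edges k =>
    edges ++ ((pos.getD (PySem.Int.toChars (k - 1)) []).zip
              (pos.getD (PySem.Int.toChars k) [])).map (fun p => (p.1, p.2, k))) []

-- ===== PRECONDITION & SPEC =====
def Spec_pair_perfect_zip (byw : String) (n : Int) (out : List (Int × Int × Int)) : Prop := out = pair_perfect_zip_alt byw n
instance (byw : String) (n : Int) (out : List (Int × Int × Int)) : Decidable (Spec_pair_perfect_zip byw n out) := by unfold Spec_pair_perfect_zip; infer_instance

-- ===== CLAIM (what is proved, stated in full; the proofs are below) =====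
def Claim_equal_pair_perfect_zip : Prop := ∀ (byw : String) (n : Int), Dom_pair_perfect_zip byw n → Spec_pair_perfect_zip byw n (pair_perfect_zip byw n)

-- ===== LEMMAS AND PROOFS =====

-- proof-only names for the chunk each level k contributes in port A / port B
def pvChunkA (byw : String) (k : Int) : List (Int × Int × Int) :=
  let low := ((PySem.List.enumerate byw.toList 0).filter
      (fun p => [p.2] == PySem.Int.toChars (k - 1))).map (fun p => p.1)
  let high := ((PySem.List.enumerate byw.toList 0).filter
      (fun p => [p.2] == PySem.Int.toChars k)).map (fun p => p.1)
  let m : Int := min (low.length : Int) (high.length : Int)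
  ((PySem.List.slice low none (some m)).zip
   (PySem.List.slice high none (some m))).map (fun p => (p.1, p.2, k))

def pvPos (byw : String) : PySem.Dict (List Char) (List Int) :=
  (PySem.List.enumerate byw.toList 0).foldl
    (fun d p => d.modify [p.2] [] (fun t => t ++ [p.1])) PySem.Dict.empty

def pvChunkB (byw : String) (k : Int) : List (Int × Int × Int) :=
  (((pvPos byw).getD (PySem.Int.toChars (k - 1)) []).zip
   ((pvPos byw).getD (PySem.Int.toChars k) [])).map (fun p => (p.1, p.2, k))

-- zipping the two take-min prefixes is zipping the lists themselves
theorem pv_zip_take_take {α β : Type} (xs : List α) (ys : List β) (n : Nat)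
    (h : min xs.length ys.length ≤ n) : (xs.take n).zip (ys.take n) = xs.zip ys := by
  induction xs generalizing ys n with
  | nil => simp
  | cons x xs ih =>
    cases ys with
    | nil => simp
    | cons y ys =>
      cases n with
      | zero => simp at h
      | succ m =>
        simp only [List.take_succ_cons, List.zip_cons_cons]
        rw [ih ys m (by simp at h; omega)]

-- Nat.toDigitsCore never shortens its accumulator
theorem pv_toDigitsCore_len_mono (b : Nat) :
    ∀ (f n : Nat) (ds : List Char), ds.length ≤ (Nat.toDigitsCore b f n ds).length := by
  intro f
  induction f with
  | zero => intro n ds; simp [Nat.toDigitsCore]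
  | succ g ih =>
    intro n ds
    simp only [Nat.toDigitsCore]
    split
    · simp
    · exact le_trans (by simp) (ih (n / b) ((n % b).digitChar :: ds))

-- str(k) has at least two characters when k ≥ 10
theorem pv_toChars_two_le (k : Int) (h : 10 ≤ k) : 2 ≤ (PySem.Int.toChars k).length := by
  have hk : ¬ k < 0 := by omega
  have h10 : 10 ≤ k.toNat := by omega
  simp only [PySem.Int.toChars, hk, if_false]
  obtain ⟨m, hm⟩ : ∃ m, k.toNat = m + 1 := ⟨k.toNat - 1, by omega⟩
  rw [Nat.toDigits, hm]
  simp only [Nat.toDigitsCore]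
  have hne : ¬ (m + 1) / 10 = 0 := by
    have : 1 ≤ (m + 1) / 10 := Nat.one_le_div_iff (by omega) |>.mpr (by omega)
    omega
  simp only [hne, if_false]
  split
  · simp
  · exact le_trans (by simp) (pv_toDigitsCore_len_mono 10 m _ _)

-- B's grouping dict, looked up at any key, is A's filtered position list
theorem pv_pos_getD (byw : String) (key : List Char) :
    (pvPos byw).getD key []
    = (((PySem.List.enumerate byw.toList 0).filter
        (fun p => [p.2] == key)).map (fun p => p.1)) := by
  have hfm := List.foldl_map (f := fun (p : Int × Char) => (([p.2] : List Char), p.1))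
    (g := fun (d : PySem.Dict (List Char) (List Int)) q => d.modify q.1 [] (fun t => t ++ [q.2]))
    (l := PySem.List.enumerate byw.toList 0) (init := PySem.Dict.empty)
  rw [pvPos, ← hfm, PySem.Dict.getD_foldl_modify_append]
  simp [List.filter_map, Function.comp_def]

-- the chunk appended for level k is the same in both ports, for every k
theorem pv_chunk_eq (byw : String) (k : Int) : pvChunkA byw k = pvChunkB byw k := by
  rw [pvChunkB, pv_pos_getD, pv_pos_getD, pvChunkA]
  set low := ((PySem.List.enumerate byw.toList 0).filter
      (fun p => [p.2] == PySem.Int.toChars (k - 1))).map (fun p => p.1) with hlow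
  set high := ((PySem.List.enumerate byw.toList 0).filter
      (fun p => [p.2] == PySem.Int.toChars k)).map (fun p => p.1) with hhigh
  have hmin : min (low.length : Int) (high.length : Int)
      = ((min low.length high.length : Nat) : Int) := by omega
  rw [hmin, PySem.List.slice_to _ (by positivity), PySem.List.slice_to _ (by positivity),
    Int.toNat_natCast, pv_zip_take_take low high _ le_rfl]

-- for levels k ≥ 10 the high list is empty, so A appends nothing
theorem pv_chunkA_nil (byw : String) (k : Int) (hk : 10 ≤ k) : pvChunkA byw k = [] := by
  have hhigh : ((PySem.List.enumerate byw.toList 0).filter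
      (fun p => [p.2] == PySem.Int.toChars k)) = [] := by
    rw [List.filter_eq_nil_iff]
    intro p _ hp
    have he : ([p.2] : List Char) = PySem.Int.toChars k := by simpa using hp
    have h2 := pv_toChars_two_le k hk
    rw [← he] at h2
    simp at h2
  rw [pvChunkA, hhigh]
  simp only [List.map_nil, List.length_nil, Nat.cast_zero]
  have hm : min ((((PySem.List.enumerate byw.toList 0).filter
      (fun p => [p.2] == PySem.Int.toChars (k - 1))).map (fun p => p.1)).length : Int) 0
      = (0 : Int) := by omega
  rw [hm, PySem.List.slice_to _ le_rfl, PySem.List.slice_to _ le_rfl]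
  simp

-- ===== VERDICT (by name: the statement is the Claim_ definition above) =====
theorem pair_perfect_zip_spec : Claim_equal_pair_perfect_zip := by
  intro byw n _
  show pair_perfect_zip byw n = pair_perfect_zip_alt byw n
  unfold pair_perfect_zip pair_perfect_zip_alt
  simp only [PySem.List.foldl_append_eq_flatMap, List.nil_append]
  show (PySem.List.pyRange 2 (n + 1) 1).flatMap (pvChunkA byw)
      = (PySem.List.pyRange 2 (min n 9 + 1) 1).flatMap (pvChunkB byw)
  by_cases hn : n ≤ 9
  · rw [min_eq_left hn]
    exact List.flatMap_congr (fun k _ => pv_chunk_eq byw k)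
  · rw [min_eq_right (by omega : (9 : Int) ≤ n),
      PySem.List.pyRange_one_append 2 10 (n + 1) (by omega) (by omega), List.flatMap_append]
    have htail : (PySem.List.pyRange 10 (n + 1) 1).flatMap (pvChunkA byw) = [] :=
      List.flatMap_eq_nil_iff.mpr
        (fun k hk => pv_chunkA_nil byw k (PySem.List.mem_pyRange_one.mp hk).1)
    rw [htail, List.append_nil]
    exact List.flatMap_congr (fun k _ => pv_chunk_eq byw k)
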